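-- pv_equiv track=rewrite | github.com/soup-stix/Advent-Of-Code-2025 | 06/2.py | regroup_and_int
-- ===== SOURCE A (Python) =====
-- def regroup_and_int(list_to_group: list[tuple[str, ...]]) -> list[tuple[int]]:
--     groups = []
--     current_grp = []
--
--     for item in list_to_group:
--         combined = "".join(item).strip()
--         if combined:
--             current_grp.append(int(combined))
--         else:
--             groups.append(tuple(current_grp))
--             current_grp = []
--
--     groups.append(tuple(current_grp))
--     return groups
-- ===== SOURCE B (Python) =====
-- def regroup_and_int(list_to_group):
--     joined = ["".join(item).strip() for item in list_to_group]
--     bounds = [-1] + [i for i, s in enumerate(joined) if not s] + [len(joined)]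
--     return [tuple(int(joined[j]) for j in range(lo + 1, hi))
--             for lo, hi in zip(bounds, bounds[1:])]
-- ===== Notes on version B (the rewrite author's own statement) =====
-- stated objective: alternative
-- what changed: B first builds a table of separator indices in one pass, then materializes each group by slicing between consecutive boundaries, instead of A's inline accumulate-and-flush loop.
import Mathlib
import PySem

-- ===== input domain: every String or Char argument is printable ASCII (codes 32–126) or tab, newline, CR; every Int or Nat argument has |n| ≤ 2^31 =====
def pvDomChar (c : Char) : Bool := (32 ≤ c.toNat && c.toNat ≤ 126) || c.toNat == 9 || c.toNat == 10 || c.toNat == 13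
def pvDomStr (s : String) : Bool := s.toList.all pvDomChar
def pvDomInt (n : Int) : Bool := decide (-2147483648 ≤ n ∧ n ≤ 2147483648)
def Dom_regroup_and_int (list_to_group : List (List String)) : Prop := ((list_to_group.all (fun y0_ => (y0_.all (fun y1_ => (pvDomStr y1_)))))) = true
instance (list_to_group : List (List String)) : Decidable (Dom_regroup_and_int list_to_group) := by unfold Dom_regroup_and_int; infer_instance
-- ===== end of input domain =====

-- B groups by a separator-index table and boundary slicing instead of A's inline accumulate-and-flush loop (alternative decomposition, same cost).

-- ===== PORT A =====
-- A: one left-to-right loop accumulating the current group and flushing it at each blank item.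
def regroupLoop : List (List String) → List (List Int) → List Int → List (List Int)
  | [], groups, current_grp => groups ++ [current_grp]
  | item :: rest, groups, current_grp =>
    let combined := PySem.Str.strip (PySem.Str.join "" item)
    if combined ≠ "" then regroupLoop rest groups (current_grp ++ [(PySem.Int.ofStr? combined).getD 0])
    else regroupLoop rest (groups ++ [current_grp]) []

def regroup_and_int (list_to_group : List (List String)) : List (List Int) :=
  regroupLoop list_to_group [] []

-- ===== PORT B =====
-- B: collect separator indices, then slice between consecutive boundaries.
def regroup_and_int_alt (list_to_group : List (List String)) : List (List Int) :=
  let joined := list_to_group.map (fun item => PySem.Str.strip (PySem.Str.join "" item))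
  let bounds : List Int :=
    [-1] ++ ((PySem.List.enumerate joined 0).filter (fun p => p.2 == "")).map (·.1)
         ++ [(joined.length : Int)]
  (bounds.zip bounds.tail).map (fun p =>
    (PySem.List.pyRange (p.1 + 1) p.2 1).map
      (fun j => (PySem.Int.ofStr? (PySem.List.pyGetD joined j "")).getD 0))

-- ===== PRECONDITION & SPEC =====
-- Pre_ excludes exactly the inputs where Python A raises ValueError: an item whose
-- joined-and-stripped text is nonempty but is not a valid int literal.
def Pre_regroup_and_int (list_to_group : List (List String)) : Prop :=
  (list_to_group.all (fun item =>
    let c := PySem.Str.strip (PySem.Str.join "" item)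
    c == "" || (PySem.Int.ofStr? c).isSome)) = true
instance (list_to_group : List (List String)) : Decidable (Pre_regroup_and_int list_to_group) := by
  unfold Pre_regroup_and_int; infer_instance
def pvWitness_regroup_and_int : List (List String) := [["1", "2"], [" "], ["-3"]]

def Spec_regroup_and_int (list_to_group : List (List String)) (out : List (List Int)) : Prop := out = regroup_and_int_alt list_to_group
instance (list_to_group : List (List String)) (out : List (List Int)) : Decidable (Spec_regroup_and_int list_to_group out) := by unfold Spec_regroup_and_int; infer_instance

-- ===== CLAIM (what is proved, stated in full; the proofs are below) =====
def Claim_equal_regroup_and_int : Prop := ∀ (list_to_group : List (List String)), Dom_regroup_and_int list_to_group → Pre_regroup_and_int list_to_group → Spec_regroup_and_int list_to_group (regroup_and_int list_to_group)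

-- ===== LEMMAS AND PROOFS =====

-- the common per-item projections
def pvJoin (item : List String) : String := PySem.Str.strip (PySem.Str.join "" item)
def pvParse (s : String) : Int := (PySem.Int.ofStr? s).getD 0

-- reference recursion both ports are reduced to
def pvSpec : List String → List (List Int)
  | [] => [[]]
  | s :: js =>
    if s = "" then [] :: pvSpec js
    else
      match pvSpec js with
      | [] => [[pvParse s]]
      | g :: gs => (pvParse s :: g) :: gs

lemma pvSpec_ne_nil (js : List String) : pvSpec js ≠ [] := by
  cases js with
  | nil => simp [pvSpec]
  | cons s js =>
    simp only [pvSpec]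
    split
    · simp
    · cases pvSpec js <;> simp

-- ===== A side =====
lemma regroup_loop_eq (lst : List (List String)) :
    ∀ (groups : List (List Int)) (cur : List Int),
      regroupLoop lst groups cur
      = groups ++ (match pvSpec (lst.map pvJoin) with
                   | [] => [cur]
                   | g :: gs => (cur ++ g) :: gs) := by
  induction lst with
  | nil => intro groups cur; simp [regroupLoop, pvSpec]
  | cons item rest ih =>
    intro groups cur
    simp only [regroupLoop, List.map_cons, pvSpec]
    by_cases hc : PySem.Str.strip (PySem.Str.join "" item) = ""
    · rw [if_neg (by simpa using hc), ih (groups ++ [cur]) [], pvJoin, if_pos hc]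
      cases h : pvSpec (rest.map pvJoin) with
      | nil => exact absurd h (pvSpec_ne_nil _)
      | cons g gs => simp
    · rw [if_pos (by simpa using hc), ih groups _, pvJoin, if_neg hc]
      cases h : pvSpec (rest.map pvJoin) with
      | nil => exact absurd h (pvSpec_ne_nil _)
      | cons g gs => simp [pvParse]

lemma regroup_eq_spec (lst : List (List String)) :
    regroup_and_int lst = pvSpec (lst.map pvJoin) := by
  unfold regroup_and_int
  rw [regroup_loop_eq lst [] []]
  cases h : pvSpec (lst.map pvJoin) with
  | nil => exact absurd h (pvSpec_ne_nil _)
  | cons g gs => simp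

-- ===== B side =====
def pvT (js : List String) : List Int :=
  ((PySem.List.enumerate js 0).filter (fun p => p.2 == "")).map (·.1) ++ [(js.length : Int)]

def pvGrp (js : List String) (p : Int × Int) : List Int :=
  (PySem.List.pyRange (p.1 + 1) p.2 1).map (fun j => pvParse (PySem.List.pyGetD js j ""))

def pvSegs (js : List String) : List (List Int) :=
  (((-1 : Int) :: pvT js).zip (pvT js)).map (pvGrp js)

lemma alt_eq_segs (lst : List (List String)) :
    regroup_and_int_alt lst = pvSegs (lst.map pvJoin) := by
  rfl

lemma enumerate_shift {α : Type} (js : List α) : ∀ s : Int,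
    PySem.List.enumerate js (s + 1) = (PySem.List.enumerate js s).map (fun p => (p.1 + 1, p.2)) := by
  induction js with
  | nil => intro s; simp [PySem.List.enumerate_nil]
  | cons x xs ih =>
    intro s
    rw [PySem.List.enumerate_cons, PySem.List.enumerate_cons, List.map_cons, ← ih (s + 1)]

lemma pvT_cons (s : String) (js : List String) :
    pvT (s :: js) = (if s = "" then [(0 : Int)] else []) ++ (pvT js).map (· + 1) := by
  unfold pvT
  rw [PySem.List.enumerate_cons, enumerate_shift js 0]
  rw [List.filter_cons, List.filter_map]
  by_cases h : s = ""
  · subst h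
    simp only [beq_self_eq_true, if_pos, List.map_cons, List.map_map, List.map_append,
      List.length_cons]
    simp [Function.comp_def]
  · rw [if_neg (by simp [h]), if_neg h]
    simp only [List.map_map, List.map_append, List.length_cons]
    simp [Function.comp_def]

lemma pvT_nonneg (js : List String) : ∀ x ∈ pvT js, (0 : Int) ≤ x := by
  intro x hx
  unfold pvT at hx
  rcases List.mem_append.mp hx with h | h
  · rcases List.mem_map.mp h with ⟨p, hp, rfl⟩
    rcases (PySem.List.mem_enumerate_iff _ _ _).mp (List.mem_of_mem_filter hp) with ⟨k, hk, rfl⟩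
    simp
  · simp at h; omega

lemma pvT_ne_nil (js : List String) : pvT js ≠ [] := by
  unfold pvT; simp

lemma pyRange_shift (a b : Int) :
    PySem.List.pyRange (a + 1) (b + 1) 1 = (PySem.List.pyRange a b 1).map (· + 1) := by
  rw [PySem.List.pyRange_one, PySem.List.pyRange_one]
  have : (b + 1 - (a + 1)).toNat = (b - a).toNat := by omega
  rw [this, List.map_map]
  apply List.map_congr_left
  intro k _
  simp [Function.comp]; ring

lemma pyGetD_cons_succ (s : String) (js : List String) (j : Int) (hj : 0 ≤ j) :
    PySem.List.pyGetD (s :: js) (j + 1) "" = PySem.List.pyGetD js j "" := by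
  obtain ⟨n, rfl⟩ := Int.eq_ofNat_of_zero_le hj
  have : ((n : Int) + 1) = ((n + 1 : Nat) : Int) := by push_cast; ring
  rw [this, PySem.List.pyGetD_natCast, PySem.List.pyGetD_natCast]
  rfl

lemma pvGrp_shift (s : String) (js : List String) (p : Int × Int) (hp : -1 ≤ p.1) :
    pvGrp (s :: js) (p.1 + 1, p.2 + 1) = pvGrp js p := by
  unfold pvGrp
  simp only
  have : p.1 + 1 + 1 = (p.1 + 1) + 1 := by ring
  rw [this, pyRange_shift, List.map_map]
  apply List.map_congr_left
  intro j hj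
  have hj0 : 0 ≤ j := by
    have := (PySem.List.mem_pyRange_one).mp hj
    omega
  simp only [Function.comp]
  rw [pyGetD_cons_succ s js j hj0]

lemma segs_eq_spec (js : List String) : pvSegs js = pvSpec js := by
  induction js with
  | nil =>
    unfold pvSegs pvT pvGrp pvSpec
    simp [PySem.List.enumerate_nil, PySem.List.pyRange_one_eq_nil]
  | cons s js ih =>
    unfold pvSegs
    by_cases h : s = ""
    · subst h
      have hT : pvT ("" :: js) = 0 :: (pvT js).map (· + 1) := by
        rw [pvT_cons]; simp
      rw [hT]
      -- bounds = -1 :: 0 :: map(+1) t;  pairs = (-1,0) :: zip (0 :: map(+1) t) (map(+1) t)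
      have hzip : ((0 : Int) :: (pvT js).map (· + 1)).zip ((pvT js).map (· + 1))
          = ((((-1 : Int) :: pvT js).zip (pvT js)).map (fun p => (p.1 + 1, p.2 + 1))) := by
        have : ((0 : Int) :: (pvT js).map (· + 1)) = (((-1 : Int) :: pvT js).map (· + 1)) := by
          simp
        rw [this, List.zip_map]
        rfl
      rw [List.zip_cons_cons, List.map_cons, hzip, List.map_map]
      have hfirst : pvGrp ("" :: js) (-1, 0) = [] := by
        unfold pvGrp
        simp [PySem.List.pyRange_one_eq_nil]
      rw [hfirst]
      have hrest : (((-1 : Int) :: pvT js).zip (pvT js)).map (pvGrp ("" :: js) ∘ fun p => (p.1 + 1, p.2 + 1))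
          = (((-1 : Int) :: pvT js).zip (pvT js)).map (pvGrp js) := by
        apply List.map_congr_left
        intro p hp
        have hmem := List.of_mem_zip hp
        have hp1 : (-1 : Int) ≤ p.1 := by
          rcases List.mem_cons.mp hmem.1 with h1 | h1
          · omega
          · have := pvT_nonneg js p.1 h1; omega
        simpa [Function.comp] using pvGrp_shift "" js p hp1
      rw [hrest]
      have ihs := ih
      unfold pvSegs at ihs
      rw [ihs]
      simp [pvSpec]
    · have hT : pvT (s :: js) = (pvT js).map (· + 1) := by
        rw [pvT_cons, if_neg h]; simp
      rw [hT]
      cases ht : pvT js with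
      | nil => exact absurd ht (pvT_ne_nil js)
      | cons h0 t' =>
        rw [List.map_cons, List.zip_cons_cons, List.map_cons]
        have h00 : (0 : Int) ≤ h0 := pvT_nonneg js h0 (by rw [ht]; simp)
        -- first group: range(0, h0+1) over (s :: js) = parse s :: range(0,h0) over js
        have hfirst : pvGrp (s :: js) (-1, h0 + 1) = pvParse s :: pvGrp js (-1, h0) := by
          unfold pvGrp
          simp only
          rw [show (-1 : Int) + 1 = 0 by ring, PySem.List.pyRange_one_cons (by omega : (0:Int) < h0 + 1)]
          rw [show (0 : Int) + 1 = 0 + 1 by rfl, pyRange_shift 0 h0, List.map_cons, List.map_map]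
          congr 1
          · simp [PySem.List.pyGetD_zero_cons, pvParse]
          · apply List.map_congr_left
            intro j hj
            have hj0 : 0 ≤ j := by
              have := (PySem.List.mem_pyRange_one).mp hj; omega
            simp only [Function.comp]
            rw [pyGetD_cons_succ s js j hj0]
        rw [hfirst]
        have hzip : ((h0 + 1) :: t'.map (· + 1)).zip (t'.map (· + 1))
            = ((h0 :: t').zip t').map (fun p => (p.1 + 1, p.2 + 1)) := by
          have : ((h0 + 1) :: t'.map (· + 1)) = ((h0 :: t').map (· + 1)) := by simp
          rw [this, List.zip_map]
          rfl
        rw [hzip, List.map_map]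
        have hrest : ((h0 :: t').zip t').map (pvGrp (s :: js) ∘ fun p => (p.1 + 1, p.2 + 1))
            = ((h0 :: t').zip t').map (pvGrp js) := by
          apply List.map_congr_left
          intro p hp
          have hmem := List.of_mem_zip hp
          have hp1 : (-1 : Int) ≤ p.1 := by
            have : p.1 ∈ pvT js := by rw [ht]; exact hmem.1
            have := pvT_nonneg js p.1 this; omega
          simpa [Function.comp] using pvGrp_shift s js p hp1
        rw [hrest]
        have := ih
        unfold pvSegs at this
        rw [ht] at this
        rw [List.zip_cons_cons, List.map_cons] at this
        rw [pvSpec, if_neg h, ← this]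

-- ===== VERDICT (by name: the statement is the Claim_ definition above) =====
theorem regroup_and_int_spec : Claim_equal_regroup_and_int := by
  intro lst _ _
  unfold Spec_regroup_and_int
  rw [regroup_eq_spec, alt_eq_segs, segs_eq_spec]
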